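-- pv_equiv track=rewrite | github.com/spraakbanken/sparv | sparv/modules/cwb/cwb.py | parse_structural_attributes
-- ===== SOURCE A (Python) =====
-- from collections import OrderedDict
--
-- def parse_structural_attributes(structural_atts: list[str]) -> list[tuple[str, list[str]]]:
--     """Parse a list of annotation names (annotation:attribute) into a list of tuples.
--
--     Args:
--         structural_atts: A list of strings representing annotation names in the format 'annotation:attribute'.
--
--     Returns:
--         A list of tuples, where each tuple contains an annotation name and a list of its attributes.
--     """
--     structs = OrderedDict()
--     for struct in structural_atts:
--         elem, _, attr = struct.partition(":")
--         if elem not in structs: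
--             structs[elem] = []
--         if attr:
--             structs[elem].append(attr)
--     return [(elem, structs[elem]) for elem in structs]
-- ===== SOURCE B (Python) =====
-- def parse_structural_attributes(structural_atts: list[str]) -> list[tuple[str, list[str]]]:
--     elems = []
--     for struct in structural_atts:
--         elem = struct.partition(":")[0]
--         if elem not in elems:
--             elems.append(elem)
--     return [
--         (elem,
--          [s.partition(":")[2] for s in structural_atts
--           if s.partition(":")[0] == elem and s.partition(":")[2]])
--         for elem in elems
--     ]
-- ===== Notes on version B (the rewrite author's own statement) =====
-- stated objective: alternative
-- what changed: A builds the grouping in one accumulating OrderedDict pass; B first collects the ordered list of distinct element prefixes and then, for each element, makes a separate filtering pass over the input to gather its non-empty attributes.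
import Mathlib
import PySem

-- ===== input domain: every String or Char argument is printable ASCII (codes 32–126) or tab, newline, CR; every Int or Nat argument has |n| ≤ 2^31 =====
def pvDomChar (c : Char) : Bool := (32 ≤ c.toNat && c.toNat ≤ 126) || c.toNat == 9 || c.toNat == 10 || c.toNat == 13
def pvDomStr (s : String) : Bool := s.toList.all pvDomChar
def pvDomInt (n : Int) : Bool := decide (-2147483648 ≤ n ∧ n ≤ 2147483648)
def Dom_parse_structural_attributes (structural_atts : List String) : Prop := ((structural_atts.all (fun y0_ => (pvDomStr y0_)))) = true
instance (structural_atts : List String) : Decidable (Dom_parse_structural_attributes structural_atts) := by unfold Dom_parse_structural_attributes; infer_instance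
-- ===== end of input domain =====

-- B replaces A's single accumulating OrderedDict pass by a first pass collecting the distinct
-- element prefixes followed by one filtering pass per element (objective: alternative decomposition).

-- ===== PORT A =====
-- s.partition(":") for the single-character separator ":", exact: (before first ':', after it);
-- the middle component is omitted because A discards it.
def pyPartitionColon (s : String) : String × String :=
  let cs := s.toList
  (String.ofList (cs.takeWhile (fun c => c != ':')), String.ofList ((cs.dropWhile (fun c => c != ':')).drop 1))

-- the body of A's `for struct in structural_atts` loop
def stepA (structs : PySem.Dict String (List String)) (struct : String) : PySem.Dict String (List String) :=
  let elem := (pyPartitionColon struct).1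
  let attr := (pyPartitionColon struct).2
  let structs := if !structs.contains elem then structs.insert elem [] else structs
  if attr != "" then structs.modify elem [] (fun v => v ++ [attr]) else structs

def parse_structural_attributes (structural_atts : List String) : List (String × List String) :=
  let structs := structural_atts.foldl stepA PySem.Dict.empty
  -- [(elem, structs[elem]) for elem in structs]: every key is present, so this is the items list
  structs.items

-- ===== PORT B =====
-- the body of B's first loop: collect distinct element prefixes in first-seen order
def stepB (elems : List String) (struct : String) : List String :=
  if (pyPartitionColon struct).1 ∈ elems then elems else elems ++ [(pyPartitionColon struct).1]

def parse_structural_attributes_alt (structural_atts : List String) : List (String × List String) :=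
  let elems := structural_atts.foldl stepB []
  elems.map (fun elem =>
    (elem,
     (structural_atts.filter
        (fun s => (pyPartitionColon s).1 == elem && (pyPartitionColon s).2 != "")).map
       (fun s => (pyPartitionColon s).2)))

-- ===== PRECONDITION & SPEC =====
def Spec_parse_structural_attributes (structural_atts : List String) (out : List (String × List String)) : Prop := out = parse_structural_attributes_alt structural_atts
instance (structural_atts : List String) (out : List (String × List String)) : Decidable (Spec_parse_structural_attributes structural_atts out) := by unfold Spec_parse_structural_attributes; infer_instance

-- ===== CLAIM (what is proved, stated in full; the proofs are below) =====
def Claim_equal_parse_structural_attributes : Prop := ∀ (structural_atts : List String), Dom_parse_structural_attributes structural_atts → Spec_parse_structural_attributes structural_atts (parse_structural_attributes structural_atts)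

-- ===== LEMMAS AND PROOFS =====

def pKey (s : String) : String := (pyPartitionColon s).1
def pAtt (s : String) : String := (pyPartitionColon s).2

-- the attribute list B produces for one element
def attsFor (e : String) (xs : List String) : List String :=
  (xs.filter (fun s => pKey s == e && pAtt s != "")).map pAtt

-- the element prefixes of xs not in `seen`, deduplicated, in first-seen order
def newElems (seen : List String) : List String → List String
  | [] => []
  | s :: t => if pKey s ∈ seen then newElems seen t else pKey s :: newElems (pKey s :: seen) t

lemma stepA_eq (d : PySem.Dict String (List String)) (s : String) :
    stepA d s =
      ((fun d1 => if pAtt s != "" then d1.insert (pKey s) (d1.getD (pKey s) [] ++ [pAtt s]) else d1)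
        (if !d.contains (pKey s) then d.insert (pKey s) [] else d)) := rfl

lemma newElems_congr (t : List String) : ∀ (seen seen' : List String),
    (∀ x, x ∈ seen ↔ x ∈ seen') → newElems seen t = newElems seen' t := by
  induction t with
  | nil => intro _ _ _; rfl
  | cons s t ih =>
    intro seen seen' h
    simp only [newElems]
    by_cases hm : pKey s ∈ seen
    · rw [if_pos hm, if_pos ((h _).mp hm)]; exact ih _ _ h
    · rw [if_neg hm, if_neg (fun hx => hm ((h _).mpr hx))]
      congr 1
      refine ih _ _ ?_
      intro x
      simp only [List.mem_cons]
      exact or_congr Iff.rfl (h x)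

lemma not_mem_of_mem_newElems (t : List String) : ∀ (seen : List String) (x : String),
    x ∈ newElems seen t → x ∉ seen := by
  induction t with
  | nil => intro _ _ h; simp [newElems] at h
  | cons s t ih =>
    intro seen x h
    simp only [newElems] at h
    by_cases hm : pKey s ∈ seen
    · rw [if_pos hm] at h; exact ih _ _ h
    · rw [if_neg hm, List.mem_cons] at h
      rcases h with h | h
      · subst h; exact hm
      · have := ih _ _ h; intro hx; exact this (List.mem_cons_of_mem _ hx)

lemma foldlB (xs : List String) : ∀ (acc : List String),
    xs.foldl stepB acc = acc ++ newElems acc xs := by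
  induction xs with
  | nil => intro acc; simp [newElems]
  | cons s t ih =>
    intro acc
    simp only [List.foldl_cons, stepB, newElems,
      show (pyPartitionColon s).1 = pKey s from rfl]
    by_cases hm : pKey s ∈ acc
    · rw [if_pos hm, if_pos hm, ih]
    · rw [if_neg hm, if_neg hm, ih]
      rw [newElems_congr t (acc ++ [pKey s]) (pKey s :: acc) (by intro x; simp [or_comm])]
      simp

lemma attsFor_cons (e s : String) (t : List String) :
    attsFor e (s :: t) =
      if pKey s == e && pAtt s != "" then pAtt s :: attsFor e t else attsFor e t := by
  simp only [attsFor, List.filter_cons]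
  split <;> simp_all

lemma mem_keys_of_mem_items (d : PySem.Dict String (List String)) (p : String × List String)
    (h : p ∈ d.items) : p.1 ∈ d.keys := by
  simp only [PySem.Dict.keys]; exact List.mem_map_of_mem h

lemma foldA_items (xs : List String) : ∀ (d : PySem.Dict String (List String)), d.keys.Nodup →
    (xs.foldl stepA d).items
      = d.items.map (fun p => (p.1, p.2 ++ attsFor p.1 xs))
        ++ (newElems d.keys xs).map (fun e => (e, attsFor e xs)) := by
  induction xs with
  | nil =>
    intro d _; simp [newElems, attsFor]
  | cons s t ih =>
    intro d hnd
    simp only [List.foldl_cons]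
    by_cases hc : d.contains (pKey s) = true
    · -- key already present
      have hks : pKey s ∈ d.keys := (PySem.Dict.contains_iff_mem_keys d _).mp hc
      have hnew : newElems d.keys (s :: t) = newElems d.keys t := by
        simp [newElems, hks]
      by_cases ha : pAtt s = ""
      · -- no attribute: the dict is unchanged
        have hd0 : stepA d s = d := by rw [stepA_eq]; simp [hc, ha]
        rw [hd0, ih d hnd, hnew]
        have h1 : d.items.map (fun p => (p.1, p.2 ++ attsFor p.1 (s :: t)))
            = d.items.map (fun p => (p.1, p.2 ++ attsFor p.1 t)) :=
          List.map_congr_left (fun p _ => by rw [attsFor_cons]; simp [ha])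
        have h2 : (newElems d.keys t).map (fun e => (e, attsFor e (s :: t)))
            = (newElems d.keys t).map (fun e => (e, attsFor e t)) :=
          List.map_congr_left (fun e _ => by rw [attsFor_cons]; simp [ha])
        rw [h1, h2]
      · -- append the attribute to the existing entry
        have hd0 : stepA d s = d.insert (pKey s) (d.getD (pKey s) [] ++ [pAtt s]) := by
          rw [stepA_eq]; simp [hc, ha]
        have hkeys : (d.insert (pKey s) (d.getD (pKey s) [] ++ [pAtt s])).keys = d.keys :=
          PySem.Dict.keys_insert_of_contains d _ hc
        have hnd2 : (d.insert (pKey s) (d.getD (pKey s) [] ++ [pAtt s])).keys.Nodup := by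
          rw [hkeys]; exact hnd
        rw [hd0, ih _ hnd2, hkeys, hnew,
            PySem.Dict.items_insert_of_contains d _ hc, List.map_map]
        have h1 : d.items.map ((fun p => (p.1, p.2 ++ attsFor p.1 t)) ∘
              (fun p => if (p.1 == pKey s) = true then (pKey s, d.getD (pKey s) [] ++ [pAtt s]) else p))
            = d.items.map (fun p => (p.1, p.2 ++ attsFor p.1 (s :: t))) := by
          refine List.map_congr_left (fun p hp => ?_)
          by_cases hpe : p.1 = pKey s
          · have hget : d.getD (pKey s) [] = p.2 := by
              have hm : (p.1, p.2) ∈ d.items := by simpa using hp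
              rw [← hpe]; exact PySem.Dict.getD_of_mem_items d hm hnd []
            rw [attsFor_cons]
            simp [Function.comp, hpe, hget, ha, List.append_assoc]
          · rw [attsFor_cons, if_neg (by simp; intro h; exact absurd h.symm hpe)]
            simp only [Function.comp_apply]
            rw [if_neg (by simpa using hpe)]
        have h2 : (newElems d.keys t).map (fun e => (e, attsFor e (s :: t)))
            = (newElems d.keys t).map (fun e => (e, attsFor e t)) := by
          refine List.map_congr_left (fun e he => ?_)
          have hne : e ≠ pKey s := fun h => (not_mem_of_mem_newElems t d.keys e he) (h ▸ hks)
          rw [attsFor_cons, if_neg (by simp; intro h; exact absurd h.symm hne)]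
        rw [h1, h2]
    · -- new key: insert with []
      have hc2 : d.contains (pKey s) = false := by simpa using hc
      have hks : pKey s ∉ d.keys := fun h => hc ((PySem.Dict.contains_iff_mem_keys d _).mpr h)
      have hnew : newElems d.keys (s :: t) = pKey s :: newElems (pKey s :: d.keys) t := by
        simp [newElems, hks]
      have hitems1 : (d.insert (pKey s) ([] : List String)).items = d.items ++ [(pKey s, [])] :=
        PySem.Dict.items_insert_of_not_contains d _ hc2
      have hkeys1 : (d.insert (pKey s) ([] : List String)).keys = d.keys ++ [pKey s] :=
        PySem.Dict.keys_insert_of_not_contains d _ hc2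
      have hnd1 : (d.insert (pKey s) ([] : List String)).keys.Nodup :=
        PySem.Dict.nodup_keys_insert d _ _ hnd
      have hcongr1 : newElems (d.keys ++ [pKey s]) t = newElems (pKey s :: d.keys) t :=
        newElems_congr t _ _ (by intro x; simp [or_comm])
      have h1 : d.items.map (fun p => (p.1, p.2 ++ attsFor p.1 (s :: t)))
          = d.items.map (fun p => (p.1, p.2 ++ attsFor p.1 t)) := by
        refine List.map_congr_left (fun p hp => ?_)
        have hpe : p.1 ≠ pKey s := fun h => hks (h ▸ mem_keys_of_mem_items d p hp)
        rw [attsFor_cons, if_neg (by simp; intro h; exact absurd h.symm hpe)]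
      have h2 : (newElems (pKey s :: d.keys) t).map (fun e => (e, attsFor e (s :: t)))
          = (newElems (pKey s :: d.keys) t).map (fun e => (e, attsFor e t)) := by
        refine List.map_congr_left (fun e he => ?_)
        have hne : e ≠ pKey s := fun h =>
          (not_mem_of_mem_newElems t _ e he) (h ▸ List.mem_cons_self)
        rw [attsFor_cons, if_neg (by simp; intro h; exact absurd h.symm hne)]
      by_cases ha : pAtt s = ""
      · have hd0 : stepA d s = d.insert (pKey s) [] := by
          rw [stepA_eq]; simp [hc2, ha]
        have hhead : attsFor (pKey s) (s :: t) = attsFor (pKey s) t := by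
          rw [attsFor_cons]; simp [ha]
        rw [hd0, ih _ hnd1, hitems1, hkeys1, hcongr1, hnew,
            List.map_append, List.map_cons, List.map_cons, h1, h2, hhead]
        simp
      · have hd0 : stepA d s = (d.insert (pKey s) []).insert (pKey s) [pAtt s] := by
          rw [stepA_eq]; simp [hc2, ha]
        have hc1 : (d.insert (pKey s) ([] : List String)).contains (pKey s) = true := by
          rw [PySem.Dict.contains_iff_mem_keys, hkeys1]; simp
        have hitems2 : ((d.insert (pKey s) []).insert (pKey s) [pAtt s]).items
            = d.items ++ [(pKey s, [pAtt s])] := by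
          rw [PySem.Dict.items_insert_of_contains _ _ hc1, hitems1]
          simp only [List.map_append, List.map_cons, List.map_nil, beq_self_eq_true, if_pos]
          have hid : d.items.map
              (fun p => if (p.1 == pKey s) = true then (pKey s, [pAtt s]) else p) = d.items := by
            refine (List.map_congr_left (g := id) (fun p hp => ?_)).trans (List.map_id _)
            have hpe : p.1 ≠ pKey s := fun h => hks (h ▸ mem_keys_of_mem_items d p hp)
            simp [hpe]
          rw [hid]
        have hkeys2 : ((d.insert (pKey s) []).insert (pKey s) [pAtt s]).keys
            = d.keys ++ [pKey s] := by
          rw [PySem.Dict.keys_insert_of_contains _ _ hc1, hkeys1]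
        have hnd2 : ((d.insert (pKey s) []).insert (pKey s) [pAtt s]).keys.Nodup := by
          rw [hkeys2, ← hkeys1]; exact hnd1
        have hhead : attsFor (pKey s) (s :: t) = pAtt s :: attsFor (pKey s) t := by
          rw [attsFor_cons]; simp [ha]
        rw [hd0, ih _ hnd2, hitems2, hkeys2, hcongr1, hnew,
            List.map_append, List.map_cons, List.map_cons, h1, h2, hhead]
        simp

-- ===== VERDICT (by name: the statement is the Claim_ definition above) =====
theorem parse_structural_attributes_spec : Claim_equal_parse_structural_attributes := by
  intro xs _
  unfold Spec_parse_structural_attributes parse_structural_attributes parse_structural_attributes_alt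
  rw [foldA_items xs PySem.Dict.empty PySem.Dict.nodup_keys_empty, foldlB]
  simp [PySem.Dict.empty, PySem.Dict.keys, attsFor, pKey, pAtt]
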